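-- pv_equiv track=rewrite | github.com/crazybass81/T-Developer | backend/src/agents/meta/agent_generator.py | _minify_variables
-- ===== SOURCE A (Python) =====
-- def _minify_variables(code):
--     """Minify variable names to save space"""
--     # Simple minification (in production, use proper AST transformation)
--     replacements = {
--         "self": "s",
--         "result": "r",
--         "input": "i",
--         "output": "o",
--         "context": "c",
--         "config": "cf",
--     }
--
--     for old, new in replacements.items():
--         code = code.replace(f"{old}", f"{new}")
--
--     return code
-- ===== SOURCE B (Python) =====
-- def _minify_variables(code):
--     """Minify variable names to save space"""
--     def apply_renames(text, pairs):
--         if not pairs: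
--             return text
--         (old, new), rest = pairs[0], pairs[1:]
--         return apply_renames(text.replace(old, new), rest)
--
--     return apply_renames(code, [
--         ("self", "s"),
--         ("result", "r"),
--         ("input", "i"),
--         ("output", "o"),
--         ("context", "c"),
--         ("config", "cf"),
--     ])
-- ===== Notes on version B (the rewrite author's own statement) =====
-- stated objective: alternative
-- what changed: Replaces the dict literal and imperative for-loop that rebinds code with a recursive helper threading the string through an explicit ordered pair list; same sequential-replacement semantics.
import Mathlib
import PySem

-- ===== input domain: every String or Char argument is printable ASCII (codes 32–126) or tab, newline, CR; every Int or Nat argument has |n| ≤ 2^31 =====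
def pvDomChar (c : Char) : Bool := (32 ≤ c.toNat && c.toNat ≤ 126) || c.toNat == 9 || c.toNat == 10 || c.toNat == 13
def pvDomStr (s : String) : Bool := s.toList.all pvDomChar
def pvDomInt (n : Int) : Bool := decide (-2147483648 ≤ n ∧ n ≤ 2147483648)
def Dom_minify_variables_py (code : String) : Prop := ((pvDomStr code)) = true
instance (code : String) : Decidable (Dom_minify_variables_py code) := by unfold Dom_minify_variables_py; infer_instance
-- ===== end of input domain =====

-- B replaces the dict literal and imperative for-loop with a recursive helper threading
-- the string through an explicit ordered pair list (alternative decomposition, same cost).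


-- ===== PORT A =====
-- A: a dict of replacements, then one str.replace pass per item, in insertion order.
def minify_variables_py (code : String) : String :=
  let replacements : PySem.Dict String String :=
    ((((((PySem.Dict.empty.insert "self" "s").insert "result" "r").insert "input" "i").insert
        "output" "o").insert "context" "c").insert "config" "cf")
  replacements.items.foldl (fun c p => PySem.Str.replace c p.1 p.2) code

-- ===== PORT B =====
-- B's apply_renames: recurse over the pair list, threading the replaced string.
def pvApplyRenames (text : String) : List (String × String) → String
  | [] => text
  | (old, new) :: rest => pvApplyRenames (PySem.Str.replace text old new) rest

def minify_variables_py_alt (code : String) : String :=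
  pvApplyRenames code
    [("self", "s"), ("result", "r"), ("input", "i"), ("output", "o"), ("context", "c"),
      ("config", "cf")]

-- ===== PRECONDITION & SPEC =====
def Spec_minify_variables_py (code : String) (out : String) : Prop := out = minify_variables_py_alt code
instance (code : String) (out : String) : Decidable (Spec_minify_variables_py code out) := by unfold Spec_minify_variables_py; infer_instance

-- ===== CLAIM (what is proved, stated in full; the proofs are below) =====
def Claim_equal_minify_variables_py : Prop := ∀ (code : String), Dom_minify_variables_py code → Spec_minify_variables_py code (minify_variables_py code)

-- ===== LEMMAS AND PROOFS =====
theorem pvDictItems :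
    PySem.Dict.items
        (PySem.Dict.insert
          (PySem.Dict.insert
            (PySem.Dict.insert
              (PySem.Dict.insert
                (PySem.Dict.insert
                  (PySem.Dict.insert (PySem.Dict.empty : PySem.Dict String String) "self" "s")
                  "result" "r")
                "input" "i")
              "output" "o")
            "context" "c")
          "config" "cf")
      = [("self", "s"), ("result", "r"), ("input", "i"), ("output", "o"), ("context", "c"),
        ("config", "cf")] := by decide

theorem foldl_replace_eq_apply (pairs : List (String × String)) :
    ∀ (c : String),
      pairs.foldl (fun c p => PySem.Str.replace c p.1 p.2) c = pvApplyRenames c pairs := by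
  induction pairs with
  | nil => intro c; rfl
  | cons p rest ih => intro c; cases p; simp [List.foldl, pvApplyRenames, ih]

-- ===== VERDICT (by name: the statement is the Claim_ definition above) =====
theorem minify_variables_py_spec : Claim_equal_minify_variables_py := by
  intro code _
  show minify_variables_py code = minify_variables_py_alt code
  unfold minify_variables_py minify_variables_py_alt
  dsimp only
  rw [pvDictItems, foldl_replace_eq_apply]
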